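-- pv_equiv track=rewrite | github.com/AleksandrKrivoruchko/pythonTest | testPython/task3.py | rhomb
-- ===== SOURCE A (Python) =====
-- def rhomb(width, height, symbol):
--     x_middle = width//2 + 1
--     y_middle = height//2 + 1
--     str_rhomb = ''
--     position_x = 0
--     for i in range(1,height +1):
--         for j in range(1, width + 1):
--             if x_middle + position_x == j or x_middle - position_x == j:
--                 str_rhomb += symbol
--             else:
--                 str_rhomb += ' '
--         str_rhomb += '\n'
--         if i < y_middle:
--             position_x += 1
--         else:
--             position_x -= 1
--     return str_rhomb
-- ===== SOURCE B (Python) =====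
-- def rhomb(width, height, symbol):
--     # Direct placement: build each row as a list of width spaces and set the
--     # (at most two) symbol positions, instead of scanning every column.
--     x_mid = width // 2 + 1
--     y_mid = height // 2 + 1
--     rows = []
--     px = 0
--     for i in range(1, height + 1):
--         cells = [' '] * width
--         for c in (x_mid - px, x_mid + px):
--             if 1 <= c <= width:
--                 cells[c - 1] = symbol
--         rows.append(''.join(cells) + '\n')
--         px += 1 if i < y_mid else -1
--     return ''.join(rows)
-- ===== Notes on version B (the rewrite author's own statement) =====
-- stated objective: alternative
-- what changed: Each row is built as a list of width spaces with the at-most-two symbol positions set directly by index (clamped to [1,width]), rows joined at the end, replacing A's per-cell inner scan that compares every column against the two positions.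
import Mathlib
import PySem

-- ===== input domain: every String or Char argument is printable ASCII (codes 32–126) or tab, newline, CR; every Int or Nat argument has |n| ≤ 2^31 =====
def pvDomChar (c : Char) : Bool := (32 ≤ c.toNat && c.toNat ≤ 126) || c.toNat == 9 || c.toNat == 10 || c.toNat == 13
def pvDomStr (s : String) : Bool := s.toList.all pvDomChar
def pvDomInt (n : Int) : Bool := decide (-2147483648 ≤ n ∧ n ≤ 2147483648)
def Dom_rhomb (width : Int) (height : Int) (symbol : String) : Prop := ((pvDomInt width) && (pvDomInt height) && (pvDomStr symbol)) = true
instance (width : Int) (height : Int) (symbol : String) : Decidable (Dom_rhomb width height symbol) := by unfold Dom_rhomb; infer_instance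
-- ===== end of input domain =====

-- B replaces A's per-cell column scan by building each row as a list of spaces and
-- directly setting the (at most two) symbol positions; objective: simpler/alternative.


-- ===== PORT A =====
-- str_rhomb is accumulated as a List Char (Python string concatenation is exact list append).
def rhomb (width : Int) (height : Int) (symbol : String) : String :=
  let x_middle := PySem.Int.floordiv width 2 + 1
  let y_middle := PySem.Int.floordiv height 2 + 1
  let res := (PySem.List.pyRange 1 (height + 1) 1).foldl
    (fun (st : List Char × Int) i =>
      let s1 := (PySem.List.pyRange 1 (width + 1) 1).foldl
        (fun s j =>
          if x_middle + st.2 = j ∨ x_middle - st.2 = j then s ++ symbol.toList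
          else s ++ [' ']) st.1
      (s1 ++ ['\n'], if i < y_middle then st.2 + 1 else st.2 - 1))
    (([] : List Char), (0 : Int))
  String.ofList res.1

-- ===== PORT B =====
-- rows is the Python list of row strings (each a List Char); cells the per-row list.
def rhomb_alt (width : Int) (height : Int) (symbol : String) : String :=
  let x_mid := PySem.Int.floordiv width 2 + 1
  let y_mid := PySem.Int.floordiv height 2 + 1
  let res := (PySem.List.pyRange 1 (height + 1) 1).foldl
    (fun (st : List (List Char) × Int) i =>
      let cells0 : List (List Char) := List.replicate width.toNat [' ']
      let cells := [x_mid - st.2, x_mid + st.2].foldl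
        (fun cs c => if 1 ≤ c ∧ c ≤ width then cs.set (c - 1).toNat symbol.toList else cs)
        cells0
      (st.1 ++ [PySem.Chars.join [] cells ++ ['\n']],
       if i < y_mid then st.2 + 1 else st.2 - 1))
    (([] : List (List Char)), (0 : Int))
  String.ofList (PySem.Chars.join [] res.1)

-- ===== PRECONDITION & SPEC =====
def Spec_rhomb (width : Int) (height : Int) (symbol : String) (out : String) : Prop := out = rhomb_alt width height symbol
instance (width : Int) (height : Int) (symbol : String) (out : String) : Decidable (Spec_rhomb width height symbol out) := by unfold Spec_rhomb; infer_instance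

-- ===== CLAIM (what is proved, stated in full; the proofs are below) =====
def Claim_equal_rhomb : Prop := ∀ (width : Int) (height : Int) (symbol : String), Dom_rhomb width height symbol → Spec_rhomb width height symbol (rhomb width height symbol)

-- ===== LEMMAS AND PROOFS =====

theorem join_empty_sep (l : List (List Char)) : PySem.Chars.join [] l = l.flatten := by
  show List.intercalate [] l = l.flatten
  induction l with
  | nil => rfl
  | cons h t ih =>
    cases t with
    | nil => simp [List.intercalate]
    | cons h2 t2 =>
      simp only [List.intercalate, List.intersperse] at *
      simp_all [List.flatten]

-- B's cells list for one row equals the list of cells A's inner scan produces.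
theorem row_cells_eq (width x px : Int) (sym : List Char) :
    ([x - px, x + px].foldl
      (fun cs c => if 1 ≤ c ∧ c ≤ width then cs.set (c - 1).toNat sym else cs)
      (List.replicate width.toNat [' ']))
    = (PySem.List.pyRange 1 (width + 1) 1).map
        (fun j => if x + px = j ∨ x - px = j then sym else [' ']) := by
  apply List.ext_getElem
  · simp only [List.foldl]
    split_ifs <;> simp [PySem.List.length_pyRange_one]
  · intro k hk hk'
    simp only [List.length_map, PySem.List.length_pyRange_one] at hk'
    have hk2 : k < width.toNat := by omega
    rw [List.getElem_map, PySem.List.getElem_pyRange_one]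
    simp only [List.foldl]
    split_ifs with h2 h1 h1 <;>
      simp only [List.getElem_set, List.getElem_replicate] <;>
      split_ifs <;> first | rfl | omega

-- The two outer loops stay in lock-step: A's accumulated string is the flatten of B's rows.
theorem loop_eq (x y width : Int) (sym : List Char) (l : List Int) :
    ∀ (px : Int) (rows : List (List Char)),
    (l.foldl
      (fun (st : List Char × Int) i =>
        ((PySem.List.pyRange 1 (width + 1) 1).foldl
          (fun s j => if x + st.2 = j ∨ x - st.2 = j then s ++ sym else s ++ [' ']) st.1
         ++ ['\n'],
         if i < y then st.2 + 1 else st.2 - 1))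
      (rows.flatten, px))
    =
    ((l.foldl
      (fun (st : List (List Char) × Int) i =>
        (st.1 ++ [PySem.Chars.join []
            ([x - st.2, x + st.2].foldl
              (fun cs c => if 1 ≤ c ∧ c ≤ width then cs.set (c - 1).toNat sym else cs)
              (List.replicate width.toNat [' '])) ++ ['\n']],
         if i < y then st.2 + 1 else st.2 - 1))
      (rows, px)).1.flatten,
     (l.foldl
      (fun (st : List (List Char) × Int) i =>
        (st.1 ++ [PySem.Chars.join []
            ([x - st.2, x + st.2].foldl
              (fun cs c => if 1 ≤ c ∧ c ≤ width then cs.set (c - 1).toNat sym else cs)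
              (List.replicate width.toNat [' '])) ++ ['\n']],
         if i < y then st.2 + 1 else st.2 - 1))
      (rows, px)).2) := by
  induction l with
  | nil => intro px rows; rfl
  | cons i t ih =>
    intro px rows
    simp only [List.foldl_cons]
    have hfun : (fun (s : List Char) j =>
        if x + px = j ∨ x - px = j then s ++ sym else s ++ [' '])
        = (fun s j => s ++ (if x + px = j ∨ x - px = j then sym else [' '])) := by
      funext s j; split_ifs <;> rfl
    have hrow : (PySem.List.pyRange 1 (width + 1) 1).foldl
        (fun s j => if x + px = j ∨ x - px = j then s ++ sym else s ++ [' ']) rows.flatten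
        ++ ['\n']
        = (rows ++ [PySem.Chars.join []
            ([x - px, x + px].foldl
              (fun cs c => if 1 ≤ c ∧ c ≤ width then cs.set (c - 1).toNat sym else cs)
              (List.replicate width.toNat [' '])) ++ ['\n']]).flatten := by
      rw [row_cells_eq width x px sym, join_empty_sep, hfun]
      rw [PySem.List.foldl_append_eq_flatMap
        (g := fun j => if x + px = j ∨ x - px = j then sym else [' '])]
      simp [List.flatMap]
    rw [hrow]
    exact ih _ _

-- ===== VERDICT (by name: the statement is the Claim_ definition above) =====
theorem rhomb_spec : Claim_equal_rhomb := by
  intro width height symbol _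
  show rhomb width height symbol = rhomb_alt width height symbol
  unfold rhomb rhomb_alt
  dsimp only
  rw [join_empty_sep]
  have h := loop_eq (PySem.Int.floordiv width 2 + 1) (PySem.Int.floordiv height 2 + 1)
      width symbol.toList (PySem.List.pyRange 1 (height + 1) 1) 0 []
  simp only [List.flatten_nil] at h
  rw [h]
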